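-- pv_equiv track=rewrite | github.com/posl/comment_recommendation | script/split_gen/3_time/zh/251_B/4.py | solve
-- ===== SOURCE A (Python) =====
-- def solve(N, W, A):
--     A.sort()
--     A = list(set(A))
--     dp = [False] * (W + 1)
--     dp[0] = True
--     for i in range(len(A)):
--         for j in range(W, -1, -1):
--             if j - A[i] >= 0 and dp[j - A[i]]:
--                 dp[j] = True
--     ans = 0
--     for i in range(W + 1):
--         if dp[i]:
--             ans += 1
--     return ans
-- ===== SOURCE B (Python) =====
-- def solve(N, W, A):
--     A.sort()
--
--     def sums(items):
--         # bitmask whose bit s is set iff s is an achievable subset sum <= W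
--         if len(items) == 0:
--             return 1
--         if len(items) == 1:
--             return (1 | (1 << items[0])) & ((1 << (W + 1)) - 1)
--         mid = len(items) // 2
--         lo, hi = sums(items[:mid]), sums(items[mid:])
--         out = 0
--         shift = 0
--         while lo:
--             if lo & 1:
--                 out |= hi << shift
--             lo >>= 1
--             shift += 1
--         return out & ((1 << (W + 1)) - 1)
--
--     return bin(sums(sorted(set(A)))).count("1")
-- ===== Notes on version B (the rewrite author's own statement) =====
-- stated objective: alternative
-- what changed: Replaces the iterative size-(W+1) boolean knapsack array (reverse inner sweep + counting pass) by a divide-and-conquer recursion: split the distinct items in half, compute each half's achievable subset sums <= W as a bitmask on one big integer, merge the halves by a truncated shift-convolution, and return the popcount of the final mask.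
import Mathlib
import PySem

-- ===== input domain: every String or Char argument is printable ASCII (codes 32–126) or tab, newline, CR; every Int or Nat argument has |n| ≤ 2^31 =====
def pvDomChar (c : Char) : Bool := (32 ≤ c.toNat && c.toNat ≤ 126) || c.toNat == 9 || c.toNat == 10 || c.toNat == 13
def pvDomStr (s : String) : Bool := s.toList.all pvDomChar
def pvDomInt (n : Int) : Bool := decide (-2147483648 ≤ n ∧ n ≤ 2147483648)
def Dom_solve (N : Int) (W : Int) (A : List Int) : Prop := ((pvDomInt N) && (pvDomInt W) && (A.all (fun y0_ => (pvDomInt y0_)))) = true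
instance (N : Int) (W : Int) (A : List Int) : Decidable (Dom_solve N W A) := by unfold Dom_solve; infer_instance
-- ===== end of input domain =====

-- B replaces A's iterative boolean knapsack array (reverse inner sweep + counting pass) by a
-- divide-and-conquer recursion over the distinct items computing bitmasks of achievable sums,
-- merged by shift-convolution and finished by a popcount; equivalence is about the return value
-- (both versions sort A in place first).

-- ===== PORT A =====
-- inner loop 'for j in range(W, -1, -1): if j - A[i] >= 0 and dp[j - A[i]]: dp[j] = True'
-- (pyGetD's default is only reached where Python would raise IndexError, i.e. outside Pre_)
def innerStep (a : Int) (dp : List Bool) (j : Int) : List Bool :=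
  if 0 ≤ j - a ∧ PySem.List.pyGetD dp (j - a) false = true then dp.set j.toNat true else dp

def stepA (W a : Int) (dp : List Bool) : List Bool :=
  (PySem.List.pyRange W (-1) (-1)).foldl (innerStep a) dp

def solve (N : Int) (W : Int) (A : List Int) : Int :=
  let As : List Int := PySem.List.sorted A (fun x => x) false          -- A.sort()
  let Ad : List Int := PySem.Set.ofList As                             -- A = list(set(A))
  -- dp = [False] * (W + 1); dp[0] = True (IndexError when W < 0: outside Pre_, set is a no-op)
  let dp0 : List Bool := (List.replicate (W + 1).toNat false).set 0 true
  let dp := (PySem.List.pyRange 0 (Ad.length : Int) 1).foldl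
    (fun dp i => stepA W (PySem.List.pyGetD Ad i 0) dp) dp0
  (PySem.List.pyRange 0 (W + 1) 1).foldl
    (fun ans i => if PySem.List.pyGetD dp i false = true then ans + 1 else ans) 0

-- ===== PORT B =====
-- 'while lo: if lo & 1: out |= hi << shift; lo >>= 1; shift += 1'  (masks are nonnegative, so Nat)
def mergeLoop (hi : Nat) (lo : Nat) (shift : Nat) (out : Nat) : Nat :=
  if h : lo = 0 then out
  else mergeLoop hi (lo >>> 1) (shift + 1)
    (if lo &&& 1 = 1 then out ||| (hi <<< shift) else out)
termination_by lo
decreasing_by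
  simpa [Nat.shiftRight_one] using Nat.div_lt_self (Nat.pos_of_ne_zero h) one_lt_two

-- the recursive helper 'sums(items)' of Source B (termination: both halves are shorter);
-- '1 << items[0]' raises on a negative item in Python (outside Pre_): '.toNat' stands in there
def sumsB (W : Int) (items : List Int) : Nat :=
  if _h0 : items.length = 0 then 1
  else if _h1 : items.length = 1 then
    (1 ||| (1 <<< (PySem.List.pyGetD items 0 0).toNat)) &&& ((1 <<< (W + 1).toNat) - 1)
  else
    let mid := items.length / 2
    mergeLoop (sumsB W (items.drop mid)) (sumsB W (items.take mid)) 0 0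
      &&& ((1 <<< (W + 1).toNat) - 1)
termination_by items.length
decreasing_by
  all_goals
    simp only [List.length_take, List.length_drop]
    omega

-- bin(m).count("1"): the number of set bits
def popcount (m : Nat) : Nat :=
  if m = 0 then 0 else (m &&& 1) + popcount (m >>> 1)
decreasing_by
  simpa [Nat.shiftRight_one] using Nat.div_lt_self (Nat.pos_of_ne_zero ‹m ≠ 0›) one_lt_two

def solve_alt (N : Int) (W : Int) (A : List Int) : Int :=
  let As : List Int := PySem.List.sorted A (fun x => x) false          -- A.sort() (in-place only)
  ((popcount (sumsB W (PySem.List.sorted (PySem.Set.ofList As) (fun x => x) false))) : Int)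

-- ===== PRECONDITION & SPEC =====
-- Pre_ excludes exactly the inputs on which A raises IndexError: W < 0 (dp[0] on an empty dp)
-- or a negative element of A (dp index j - A[i] beyond the end of dp).
def Pre_solve (N : Int) (W : Int) (A : List Int) : Prop := 0 ≤ W ∧ ∀ a ∈ A, 0 ≤ a
instance (N : Int) (W : Int) (A : List Int) : Decidable (Pre_solve N W A) := by
  unfold Pre_solve; infer_instance

def pvWitness_solve : Int × Int × List Int := (2, 7, [3, 1])

def Spec_solve (N : Int) (W : Int) (A : List Int) (out : Int) : Prop := out = solve_alt N W A
instance (N : Int) (W : Int) (A : List Int) (out : Int) : Decidable (Spec_solve N W A out) := by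
  unfold Spec_solve; infer_instance

-- ===== CLAIM (what is proved, stated in full; the proofs are below) =====
def Claim_equal_solve : Prop := ∀ (N : Int) (W : Int) (A : List Int),
  Dom_solve N W A → Pre_solve N W A → Spec_solve N W A (solve N W A)

-- ===== LEMMAS AND PROOFS =====

-- the common specification: j is a subset sum of the item list
def Reach (items : List Int) (j : Int) : Prop := ∃ s : List Int, s.Sublist items ∧ s.sum = j

theorem reach_nil (j : Int) : Reach [] j ↔ j = 0 := by
  constructor
  · rintro ⟨s, hs, rfl⟩
    rw [List.sublist_nil.mp hs]; rfl
  · rintro rfl; exact ⟨[], List.Sublist.refl _, rfl⟩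

theorem sum_nonneg_of_sublist (s L : List Int) (h : s.Sublist L) (hL : ∀ a ∈ L, 0 ≤ a) :
    0 ≤ s.sum :=
  List.sum_nonneg (fun x hx => hL x (h.subset hx))

theorem reach_nonneg (L : List Int) (hL : ∀ a ∈ L, 0 ≤ a) (j : Int) (h : Reach L j) : 0 ≤ j := by
  obtain ⟨s, hs, rfl⟩ := h
  exact sum_nonneg_of_sublist s L hs hL

theorem reach_append (L R : List Int) (j : Int) :
    Reach (L ++ R) j ↔ ∃ x y : Int, Reach L x ∧ Reach R y ∧ j = x + y := by
  constructor
  · rintro ⟨s, hs, rfl⟩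
    obtain ⟨s1, s2, rfl, h1, h2⟩ := List.sublist_append_iff.mp hs
    exact ⟨s1.sum, s2.sum, ⟨s1, h1, rfl⟩, ⟨s2, h2, rfl⟩, by rw [List.sum_append]⟩
  · rintro ⟨x, y, ⟨s1, h1, rfl⟩, ⟨s2, h2, rfl⟩, rfl⟩
    exact ⟨s1 ++ s2, h1.append h2, by rw [List.sum_append]⟩

theorem reach_singleton (a j : Int) : Reach [a] j ↔ j = 0 ∨ j = a := by
  constructor
  · rintro ⟨s, hs, rfl⟩
    rcases List.sublist_singleton.mp hs with rfl | rfl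
    · exact Or.inl rfl
    · exact Or.inr (by simp)
  · rintro (rfl | h)
    · exact ⟨[], List.nil_sublist _, rfl⟩
    · exact ⟨[a], List.Sublist.refl _, by simpa using h.symm⟩

-- dp-side facts ---------------------------------------------------------------

theorem innerStep_length (a : Int) (dp : List Bool) (j : Int) :
    (innerStep a dp j).length = dp.length := by
  unfold innerStep; split <;> simp

theorem stepA_length (W a : Int) (dp : List Bool) : (stepA W a dp).length = dp.length := by
  unfold stepA
  generalize PySem.List.pyRange W (-1) (-1) = l
  induction l generalizing dp with
  | nil => rfl
  | cons j t ih =>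
      simp only [List.foldl_cons]
      rw [ih, innerStep_length]

theorem foldA_length (W : Int) (L : List Int) (dp : List Bool) :
    (L.foldl (fun dp a => stepA W a dp) dp).length = dp.length := by
  induction L generalizing dp with
  | nil => rfl
  | cons a t ih =>
      simp only [List.foldl_cons]
      rw [ih, stepA_length]

theorem innerStep_getD_ne (a : Int) (dp : List Bool) (k : Nat) (m : Nat) (hm : m ≠ k) :
    (innerStep a dp (k : Int)).getD m false = dp.getD m false := by
  unfold innerStep
  split
  · rw [Int.toNat_natCast, List.getD_eq_getElem?_getD, List.getD_eq_getElem?_getD,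
      List.getElem?_set_ne (fun h => hm h.symm)]
  · rfl

theorem innerStep_getD_self (a : Int) (dp : List Bool) (k : Nat) (hk : k < dp.length) :
    (innerStep a dp (k : Int)).getD k false =
      (dp.getD k false || (decide (a ≤ (k : Int)) && dp.getD ((k : Int) - a).toNat false)) := by
  unfold innerStep
  by_cases hg : 0 ≤ (k : Int) - a ∧ PySem.List.pyGetD dp ((k : Int) - a) false = true
  · rw [if_pos hg, Int.toNat_natCast]
    have h1 : decide (a ≤ (k : Int)) = true := by
      simp only [decide_eq_true_iff]; omega
    have h2 : dp.getD ((k : Int) - a).toNat false = true := by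
      rw [← PySem.List.pyGetD_of_nonneg dp false hg.1]; exact hg.2
    rw [h1, h2, List.getD_eq_getElem?_getD, List.getElem?_set_self hk]
    simp
  · rw [if_neg hg]
    have h2 : (decide (a ≤ (k : Int)) && dp.getD ((k : Int) - a).toNat false) = false := by
      by_cases hak : a ≤ (k : Int)
      · have hcontra : ¬ dp.getD ((k : Int) - a).toNat false = true := fun hc =>
          hg ⟨by omega, by rw [PySem.List.pyGetD_of_nonneg dp false (by omega)]; exact hc⟩
        simp only [Bool.and_eq_false_iff]
        exact Or.inr (Bool.eq_false_iff.mpr hcontra)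
      · simp [hak]
    rw [h2, Bool.or_false]

-- characterisation of the countdown inner loop: one 0/1-knapsack step
theorem countdown_getD (a : Int) (ha : 0 ≤ a) :
    ∀ (k : Nat) (dp : List Bool), k ≤ dp.length → ∀ (j : Nat),
      (((PySem.List.pyRange ((k : Int) - 1) (-1) (-1)).foldl (innerStep a) dp).getD j false) =
      if j < k then
        (dp.getD j false || (decide (a ≤ (j : Int)) && dp.getD ((j : Int) - a).toNat false))
      else dp.getD j false := by
  intro k
  induction k with
  | zero =>
      intro dp _ j
      rw [show ((0 : Nat) : Int) - 1 = (-1 : Int) by norm_num,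
        PySem.List.pyRange_neg_one_eq_nil (le_refl _)]
      simp
  | succ k ih =>
      intro dp hlen j
      rw [show (((k + 1 : Nat)) : Int) - 1 = (k : Int) by push_cast; ring,
        PySem.List.pyRange_neg_one_cons (by omega : (-1 : Int) < (k : Int))]
      simp only [List.foldl_cons]
      have hlen' : (innerStep a dp (k : Int)).length = dp.length := innerStep_length a dp _
      rw [ih (innerStep a dp (k : Int)) (by omega) j]
      rcases Nat.lt_trichotomy j k with hj | hj | hj
      · rw [if_pos hj, if_pos (by omega : j < k + 1),
          innerStep_getD_ne a dp k j (Nat.ne_of_lt hj)]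
        by_cases hak : a ≤ (j : Int)
        · rw [innerStep_getD_ne a dp k _ (by omega : ((j : Int) - a).toNat ≠ k)]
        · simp [hak]
      · subst hj
        rw [if_neg (lt_irrefl j), if_pos (Nat.lt_succ_self j),
          innerStep_getD_self a dp j (by omega)]
      · rw [if_neg (by omega : ¬ j < k), if_neg (by omega : ¬ j < k + 1),
          innerStep_getD_ne a dp k j (Nat.ne_of_gt hj)]

theorem stepA_getD (W a : Int) (hW : 0 ≤ W) (ha : 0 ≤ a) (dp : List Bool)
    (hlen : dp.length = (W + 1).toNat) (j : Nat) :
    (stepA W a dp).getD j false =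
      if j < dp.length then
        (dp.getD j false || (decide (a ≤ (j : Int)) && dp.getD ((j : Int) - a).toNat false))
      else dp.getD j false := by
  have hk : (((W + 1).toNat : Int) - 1) = W := by omega
  have h := countdown_getD a ha (W + 1).toNat dp (by omega) j
  rw [hk] at h
  unfold stepA
  rw [h, hlen]

theorem dp0_getD (W : Int) (hW : 0 ≤ W) (j : Nat) (hj : j < (W + 1).toNat) :
    ((List.replicate (W + 1).toNat false).set 0 true).getD j false = true ↔ j = 0 := by
  have hn : 0 < (W + 1).toNat := by omega
  by_cases h0 : j = 0
  · subst h0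
    rw [List.getD_eq_getElem?_getD, List.getElem?_set_self (by simpa using hn)]
    simp
  · rw [List.getD_eq_getElem?_getD, List.getElem?_set_ne (fun h => h0 h.symm),
      List.getElem?_replicate]
    simp [hj, h0]

-- A's dp after the fold marks exactly the subset sums below W+1
theorem dpA_getD (W : Int) (hW : 0 ≤ W) (L : List Int) (hL : ∀ a ∈ L, 0 ≤ a)
    (j : Nat) (hj : j < (W + 1).toNat) :
    ((L.foldl (fun dp a => stepA W a dp)
        ((List.replicate (W + 1).toNat false).set 0 true)).getD j false = true) ↔
      Reach L (j : Int) := by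
  induction L using List.reverseRecOn generalizing j with
  | nil =>
      simp only [List.foldl_nil]
      rw [dp0_getD W hW j hj, reach_nil]
      exact ⟨fun h => by exact_mod_cast h, fun h => by exact_mod_cast h⟩
  | append_singleton L y ih =>
      have hy : 0 ≤ y := hL y (by simp)
      have hL' : ∀ a ∈ L, 0 ≤ a := fun a ha => hL a (by simp [ha])
      rw [List.foldl_append, List.foldl_cons, List.foldl_nil]
      set dp := L.foldl (fun dp a => stepA W a dp)
        ((List.replicate (W + 1).toNat false).set 0 true) with hdp
      have hlen : dp.length = (W + 1).toNat := by
        rw [hdp, foldA_length]; simp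
      rw [stepA_getD W y hW hy dp hlen j, if_pos (hlen ▸ hj), Bool.or_eq_true,
        Bool.and_eq_true, decide_eq_true_iff, ih hL' j hj]
      constructor
      · rintro (h | ⟨hyj, hsub⟩)
        · obtain ⟨s, hs, hsum⟩ := h
          exact ⟨s, hs.trans (List.sublist_append_left L [y]), hsum⟩
        · have hidx : ((j : Int) - y).toNat < (W + 1).toNat := by omega
          have hr := (ih hL' ((j : Int) - y).toNat hidx).mp hsub
          rw [Int.toNat_of_nonneg (by omega)] at hr
          obtain ⟨s, hs, hsum⟩ := hr
          refine ⟨s ++ [y], hs.append (List.Sublist.refl _), ?_⟩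
          have hsa : (s ++ [y]).sum = s.sum + y := by rw [List.sum_append]; simp
          omega
      · rintro ⟨s, hs, hsum⟩
        obtain ⟨s1, s2, rfl, h1, h2⟩ := List.sublist_append_iff.mp hs
        rcases List.sublist_singleton.mp h2 with rfl | rfl
        · exact Or.inl ⟨s1, h1, by simpa using hsum⟩
        · have hx : 0 ≤ s1.sum := sum_nonneg_of_sublist s1 L h1 hL'
          have hsum' : s1.sum + y = (j : Int) := by
            rw [← hsum, List.sum_append]; simp
          refine Or.inr ⟨by omega, ?_⟩
          have hidx : ((j : Int) - y).toNat < (W + 1).toNat := by omega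
          apply (ih hL' _ hidx).mpr
          rw [Int.toNat_of_nonneg (by omega)]
          exact ⟨s1, h1, by omega⟩

-- bit-side facts --------------------------------------------------------------

theorem mergeLoop_testBit (hi : Nat) :
    ∀ (lo shift out j : Nat),
      ((mergeLoop hi lo shift out).testBit j = true) ↔
        (out.testBit j = true ∨
          ∃ t y : Nat, lo.testBit t = true ∧ hi.testBit y = true ∧ j = shift + t + y) := by
  intro lo
  induction lo using Nat.strong_induction_on with
  | _ lo ih =>
      intro shift out j
      rw [mergeLoop]
      by_cases h : lo = 0
      · subst h
        simp [Nat.zero_testBit]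
      · rw [dif_neg h]
        have hlt : lo >>> 1 < lo := by
          simpa [Nat.shiftRight_one] using Nat.div_lt_self (Nat.pos_of_ne_zero h) one_lt_two
        rw [ih _ hlt]
        have hsr : ∀ t : Nat, (lo >>> 1).testBit t = lo.testBit (1 + t) :=
          fun t => Nat.testBit_shiftRight ..
        have hbit0 : (lo &&& 1 = 1) ↔ lo.testBit 0 = true := by
          rw [Nat.and_one_is_mod, Nat.testBit_zero]
          simp
        constructor
        · rintro (ho | ⟨t, y, hbt, hby, rfl⟩)
          · by_cases h0 : lo &&& 1 = 1
            · rw [if_pos h0, Nat.testBit_or, Bool.or_eq_true] at ho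
              rcases ho with ho | ho
              · exact Or.inl ho
              · rw [Nat.testBit_shiftLeft, Bool.and_eq_true, decide_eq_true_iff] at ho
                exact Or.inr ⟨0, j - shift, hbit0.mp h0, ho.2, by omega⟩
            · rw [if_neg h0] at ho
              exact Or.inl ho
          · rw [hsr] at hbt
            exact Or.inr ⟨1 + t, y, hbt, hby, by omega⟩
        · rintro (ho | ⟨t, y, hbt, hby, rfl⟩)
          · refine Or.inl ?_
            split
            · rw [Nat.testBit_or, ho]; rfl
            · exact ho
          · match t with
            | 0 =>
                refine Or.inl ?_
                rw [if_pos (hbit0.mpr hbt), Nat.testBit_or, Nat.testBit_shiftLeft]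
                have : decide (shift + 0 + y ≥ shift) = true := by
                  simp
                rw [this]
                have : shift + 0 + y - shift = y := by omega
                rw [this, hby]
                simp
            | t + 1 =>
                refine Or.inr ⟨t, y, ?_, hby, by omega⟩
                rw [hsr]
                have : 1 + t = t + 1 := by omega
                rw [this]; exact hbt

theorem popcount_eq_countP :
    ∀ (n m : Nat), m < 2 ^ n → popcount m = (List.range n).countP (fun j => m.testBit j) := by
  intro n
  induction n with
  | zero =>
      intro m hm
      have : m = 0 := by omega
      subst this
      rw [popcount]
      simp
  | succ n ih =>
      intro m hm
      by_cases h0 : m = 0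
      · subst h0
        rw [popcount]
        simp [Nat.zero_testBit]
      · rw [popcount, if_neg h0]
        have h2 : m >>> 1 = m / 2 := Nat.shiftRight_one m
        have hlt : m / 2 < 2 ^ n := by
          have hpow : 2 ^ (n + 1) = 2 * 2 ^ n := by ring
          omega
        rw [h2, ih (m / 2) hlt, List.range_succ_eq_map, List.countP_cons, List.countP_map]
        have hsucc : ((fun j => m.testBit j) ∘ Nat.succ) = fun j => (m / 2).testBit j := by
          funext j
          simp [Function.comp, Nat.succ_eq_add_one, Nat.testBit_succ]
        rw [hsucc]
        beta_reduce
        have hb : (m &&& 1) = if m.testBit 0 = true then 1 else 0 := by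
          rw [Nat.and_one_is_mod, Nat.testBit_zero]
          rcases Nat.mod_two_eq_zero_or_one m with h | h <;> simp [h]
        rw [hb]
        omega

theorem sumsB_lt (W : Int) (hW : 0 ≤ W) (items : List Int) :
    sumsB W items < 2 ^ (W + 1).toNat := by
  have hmask : (1 <<< (W + 1).toNat) - 1 = 2 ^ (W + 1).toNat - 1 := by
    rw [Nat.shiftLeft_eq, one_mul]
  have hpos : 0 < 2 ^ (W + 1).toNat := Nat.pow_pos (by omega)
  rw [sumsB]
  by_cases h0 : items.length = 0
  · rw [dif_pos h0]
    have : 1 ≤ (W + 1).toNat := by omega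
    calc 1 < 2 ^ 1 := by omega
    _ ≤ 2 ^ (W + 1).toNat := Nat.pow_le_pow_right (by omega) this
  · rw [dif_neg h0]
    by_cases h1 : items.length = 1
    · rw [dif_pos h1, hmask, Nat.and_two_pow_sub_one_eq_mod]
      exact Nat.mod_lt _ hpos
    · rw [dif_neg h1]
      rw [hmask, Nat.and_two_pow_sub_one_eq_mod]
      exact Nat.mod_lt _ hpos

-- B's recursion computes exactly the bitmask of the subset sums ≤ W
theorem sumsB_testBit (W : Int) (hW : 0 ≤ W) :
    ∀ (n : Nat) (items : List Int), items.length = n → (∀ a ∈ items, 0 ≤ a) →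
      ∀ j : Nat, ((sumsB W items).testBit j = true ↔ (Reach items (j : Int) ∧ (j : Int) ≤ W)) := by
  have hmask : (1 <<< (W + 1).toNat) - 1 = 2 ^ (W + 1).toNat - 1 := by
    rw [Nat.shiftLeft_eq, one_mul]
  intro n
  induction n using Nat.strong_induction_on with
  | _ n ih =>
      intro items hn hpos j
      rw [sumsB]
      by_cases h0 : items.length = 0
      · rw [dif_pos h0]
        obtain rfl := List.length_eq_zero_iff.mp h0
        rw [show (1 : Nat) = 2 ^ 0 by rfl, Nat.testBit_two_pow, reach_nil]
        simp only [decide_eq_true_iff]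
        constructor
        · rintro rfl
          exact ⟨by simp, hW⟩
        · rintro ⟨hj, _⟩
          omega
      · rw [dif_neg h0]
        by_cases h1 : items.length = 1
        · rw [dif_pos h1]
          obtain ⟨a, rfl⟩ := List.length_eq_one_iff.mp h1
          have ha : 0 ≤ a := hpos a (by simp)
          rw [PySem.List.pyGetD_zero_cons, hmask, Nat.testBit_and, Nat.testBit_or,
            Nat.testBit_two_pow_sub_one,
            show (1 : Nat) = 2 ^ 0 by rfl, Nat.testBit_two_pow,
            show ((2 : Nat) ^ 0) <<< a.toNat = 2 ^ a.toNat by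
              rw [Nat.shiftLeft_eq, pow_zero, one_mul],
            Nat.testBit_two_pow, reach_singleton]
          simp only [Bool.and_eq_true, Bool.or_eq_true, decide_eq_true_iff]
          constructor
          · rintro ⟨(h | h), hjn⟩
            · exact ⟨Or.inl (by omega), by omega⟩
            · exact ⟨Or.inr (by omega), by omega⟩
          · rintro ⟨(h | h), hjW⟩
            · exact ⟨Or.inl (by omega), by omega⟩
            · exact ⟨Or.inr (by omega), by omega⟩
        · rw [dif_neg h1]
          have h2 : 2 ≤ items.length := by omega
          set mid := items.length / 2 with hmid
          have hlt : (items.take mid).length < n := by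
            rw [List.length_take]; omega
          have hrt : (items.drop mid).length < n := by
            rw [List.length_drop]; omega
          have hposL : ∀ a ∈ items.take mid, 0 ≤ a :=
            fun a ha => hpos a (List.mem_of_mem_take ha)
          have hposR : ∀ a ∈ items.drop mid, 0 ≤ a :=
            fun a ha => hpos a (List.mem_of_mem_drop ha)
          have hsplit : items.take mid ++ items.drop mid = items := List.take_append_drop _ _
          rw [hmask, Nat.testBit_and, Nat.testBit_two_pow_sub_one]
          simp only [Bool.and_eq_true, decide_eq_true_iff]
          rw [mergeLoop_testBit]
          simp only [Nat.zero_testBit, Bool.false_eq_true, false_or]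
          constructor
          · rintro ⟨⟨t, y, hbt, hby, rfl⟩, hjn⟩
            obtain ⟨hrt', _⟩ := (ih _ hlt (items.take mid) rfl hposL t).mp hbt
            obtain ⟨hry', _⟩ := (ih _ hrt (items.drop mid) rfl hposR y).mp hby
            refine ⟨?_, by omega⟩
            rw [← hsplit, reach_append]
            exact ⟨(t : Int), (y : Int), hrt', hry', by omega⟩
          · rintro ⟨hr, hjW⟩
            rw [← hsplit, reach_append] at hr
            obtain ⟨x, y, hxr, hyr, hj⟩ := hr
            have hx0 : 0 ≤ x := reach_nonneg _ hposL x hxr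
            have hy0 : 0 ≤ y := reach_nonneg _ hposR y hyr
            refine ⟨⟨x.toNat, y.toNat, ?_, ?_, by omega⟩, by omega⟩
            · apply (ih _ hlt (items.take mid) rfl hposL x.toNat).mpr
              rw [Int.toNat_of_nonneg hx0]
              exact ⟨hxr, by omega⟩
            · apply (ih _ hrt (items.drop mid) rfl hposR y.toNat).mpr
              rw [Int.toNat_of_nonneg hy0]
              exact ⟨hyr, by omega⟩

-- counting --------------------------------------------------------------------

theorem foldl_count_int (p : Nat → Bool) (l : List Nat) :
    ∀ acc : Int, l.foldl (fun ans k => if p k then ans + 1 else ans) acc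
      = acc + (l.countP p : Int) := by
  induction l with
  | nil => simp
  | cons k t ih =>
      intro acc
      simp only [List.foldl_cons, List.countP_cons]
      by_cases hk : p k = true
      · rw [if_pos hk, ih]
        simp [hk]; push_cast; ring
      · rw [if_neg hk, ih]
        simp [hk]

-- the two item lists coincide -------------------------------------------------

theorem ofList_sublist (xs : List Int) : List.Sublist (PySem.Set.ofList xs) xs := by
  induction xs using List.reverseRecOn with
  | nil => simp [PySem.Set.ofList]
  | append_singleton ys y ih =>
      rw [PySem.Set.ofList_append_singleton, PySem.Set.add_eq_ite]
      split
      · exact ih.trans (List.sublist_append_left ys [y])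
      · exact ih.append (List.Sublist.refl [y])

theorem items_eq (A : List Int) :
    PySem.Set.ofList (PySem.List.sorted A (fun x => x) false) =
      PySem.List.sorted (PySem.Set.ofList A) (fun x => x) false := by
  symm
  apply PySem.List.sorted_eq_of_perm_of_pairwise_lt
  · rw [List.perm_ext_iff_of_nodup (PySem.Set.nodup_ofList _) (PySem.Set.nodup_ofList _)]
    intro x
    rw [PySem.Set.mem_ofList, PySem.Set.mem_ofList, PySem.List.mem_sorted]
  · have hle : (PySem.Set.ofList (PySem.List.sorted A (fun x => x) false)).Pairwise
        (fun a b : Int => a ≤ b) :=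
      List.Pairwise.sublist (ofList_sublist _) (PySem.List.sorted_pairwise A (fun x => x))
    have hne : (PySem.Set.ofList (PySem.List.sorted A (fun x => x) false)).Pairwise
        (fun a b : Int => a ≠ b) := PySem.Set.nodup_ofList _
    exact (hle.and hne).imp (fun h => lt_of_le_of_ne h.1 h.2)

-- assembling ------------------------------------------------------------------

theorem solve_eq_alt (N W : Int) (A : List Int) (hW : 0 ≤ W) (hA : ∀ a ∈ A, 0 ≤ a) :
    solve N W A = solve_alt N W A := by
  simp only [solve, solve_alt]
  rw [PySem.List.foldl_pyRange_zero_pyGetD'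
    (f := fun dp a => stepA W a dp)
    (xs := PySem.Set.ofList (PySem.List.sorted A (fun x => x) false)) (d := 0)]
  rw [items_eq A, PySem.List.sorted_sorted]
  set items := PySem.List.sorted (PySem.Set.ofList A) (fun x => x) false with hitems
  set dp := items.foldl (fun dp a => stepA W a dp)
    ((List.replicate (W + 1).toNat false).set 0 true) with hdp
  have hposI : ∀ a ∈ items, 0 ≤ a := fun a ha =>
    hA a ((PySem.Set.mem_ofList A a).mp ((PySem.List.mem_sorted _ _ _ _).mp ha))
  rw [PySem.List.pyRange_one 0 (W + 1), List.foldl_map]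
  simp only [zero_add, PySem.List.pyGetD_natCast, Int.sub_zero]
  rw [foldl_count_int (fun k => dp.getD k false) (List.range (W + 1).toNat) 0, zero_add]
  rw [popcount_eq_countP (W + 1).toNat (sumsB W items) (sumsB_lt W hW items)]
  congr 1
  apply List.countP_congr
  intro j hj
  rw [List.mem_range] at hj
  have h1 := dpA_getD W hW items hposI j hj
  have h2 := sumsB_testBit W hW items.length items rfl hposI j
  have hjW : (j : Int) ≤ W := by omega
  by_cases hb : (sumsB W items).testBit j = true
  · rw [hb, h1.mpr (h2.mp hb).1]
  · have : ¬ dp.getD j false = true := fun hc => hb (h2.mpr ⟨h1.mp hc, hjW⟩)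
    simp only [Bool.not_eq_true] at hb this
    rw [hb, this]

-- ===== VERDICT (by name: the statement is the Claim_ definition above) =====
theorem solve_spec : Claim_equal_solve := by
  intro N W A _ hpre
  unfold Spec_solve
  exact solve_eq_alt N W A hpre.1 hpre.2
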